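-- pv_equiv track=rewrite | github.com/axgeorge/GraphQuest | EulTours.py | find_veh_tsp_tours
-- ===== SOURCE A (Python) =====
-- def dfs(root, adj_lst, path, visited):
--     """
--     Depth first search.
--     """
--     if root not in visited:
--         visited.add(root)
--         path.append(root)
--         for node in adj_lst[root]:
--             dfs(node, adj_lst, path, visited)
--
-- def find_veh_tsp_tours(vehicles, adj_lst):
--     """
--     Return TSP tours for each vehicle by performing a DFS from each vehicle.
--     """
--     tours = list()
--     for vehicle in vehicles:
--         tour_eul = []
--         dfs(vehicle, adj_lst, tour_eul, set())
--         tour_eul.append(tour_eul[0]) # return to start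
--         tours.append(tour_eul)
--     return tours
-- ===== SOURCE B (Python) =====
-- def _tour(start, adj_lst):
--     # Iterative DFS; the tour itself doubles as the visited record
--     # (a DFS preorder never repeats a node), so no separate set is kept.
--     order = []
--     stack = [start]
--     while stack:
--         node = stack.pop()
--         if node not in order:
--             order.append(node)
--             stack.extend(reversed(adj_lst[node]))
--     return order + [order[0]]  # return to start
--
--
-- def find_veh_tsp_tours(vehicles, adj_lst):
--     return [_tour(vehicle, adj_lst) for vehicle in vehicles]
-- ===== Notes on version B (the rewrite author's own statement) =====
-- stated objective: alternative
-- what changed: The recursive dfs helper with an auxiliary visited set is replaced by a per-vehicle helper doing an explicit-stack iterative DFS whose tour list itself serves as the visited record (membership test on the tour, no set), with the outer loop becoming a list comprehension.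
import Mathlib
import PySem

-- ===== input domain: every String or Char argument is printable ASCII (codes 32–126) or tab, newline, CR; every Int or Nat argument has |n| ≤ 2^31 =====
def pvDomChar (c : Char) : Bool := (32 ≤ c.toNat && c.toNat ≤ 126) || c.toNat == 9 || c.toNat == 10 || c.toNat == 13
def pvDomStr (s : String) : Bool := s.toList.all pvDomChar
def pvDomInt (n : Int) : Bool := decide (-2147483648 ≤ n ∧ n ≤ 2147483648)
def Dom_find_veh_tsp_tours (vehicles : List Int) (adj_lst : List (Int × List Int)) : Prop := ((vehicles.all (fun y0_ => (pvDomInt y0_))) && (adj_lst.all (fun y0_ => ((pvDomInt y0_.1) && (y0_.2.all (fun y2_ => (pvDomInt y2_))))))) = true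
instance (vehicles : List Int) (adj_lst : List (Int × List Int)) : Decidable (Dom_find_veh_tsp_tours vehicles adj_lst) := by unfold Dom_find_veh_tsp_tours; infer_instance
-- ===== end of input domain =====

-- B replaces A's recursive DFS (with an auxiliary visited set) by an iterative
-- explicit-stack DFS whose tour list is itself the visited record (alternative
-- decomposition, no speed claim); equivalence is about the return value only.

-- ===== PORT A =====

-- adj_lst[k] : first-match association-list lookup; total form (Pre_ guarantees the key is
-- present wherever Python performs this lookup; Python raises KeyError on a missing key).
def pvLookup (adj_lst : List (Int × List Int)) (k : Int) : List Int :=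
  (List.lookup k adj_lst).getD []

-- fuel bound used as a totality guard by both ports (1 + total number of neighbour
-- occurrences; the DFS performs at most that many calls / stack pops, so on every input
-- both loops run to natural completion exactly as the Python does).
def pvFuel (adj_lst : List (Int × List Int)) : Nat :=
  adj_lst.foldl (fun a p => a + p.2.length) 1

-- A's recursive helper `dfs`, fuel-guarded; the `for node in adj_lst[root]` loop is the
-- recursion over the list argument (dfs root = dfsA fuel adj [root] path visited):
-- processing `n :: rest` is the call dfs(n) (visited test, mark, append, recurse into
-- adj_lst[n]) followed by the remaining iterations `rest`.  The leftover fuel is threaded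
-- (second component); `min` is only a guard for termination (fuel never increases).
def dfsA (fuel : Nat) (adj_lst : List (Int × List Int)) (ns : List Int)
    (path : List Int) (visited : PySem.Set Int) : (List Int × PySem.Set Int) × Nat :=
  match ns with
  | [] => ((path, visited), fuel)
  | n :: rest =>
    match fuel with
    | 0 => ((path, visited), 0)
    | f + 1 =>
      if PySem.Set.contains visited n then
        dfsA f adj_lst rest path visited
      else
        let r := dfsA f adj_lst (pvLookup adj_lst n) (path ++ [n]) (PySem.Set.add visited n)
        dfsA (min r.2 f) adj_lst rest r.1.1 r.1.2
termination_by fuel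
decreasing_by all_goals omega

def find_veh_tsp_tours (vehicles : List Int) (adj_lst : List (Int × List Int)) : List (List Int) :=
  vehicles.foldl
    (fun tours vehicle =>
      let tour_eul := (dfsA (pvFuel adj_lst) adj_lst [vehicle] [] PySem.Set.empty).1.1
      -- tour_eul.append(tour_eul[0]): tour_eul is never empty here (the DFS always
      -- appends the start node first), so tour_eul[0] is its head.
      tours ++ [tour_eul ++ [tour_eul.headD 0]])
    []

-- ===== PORT B =====

-- B's while-loop: the Python stack's top (end of the list) is the HEAD of the Lean list,
-- so `stack.pop()` takes the head and `stack.extend(reversed(adj_lst[node]))` makes the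
-- new stack `adj_lst[node] ++ rest`.  The only state besides the stack is `order`, B's
-- tour list, which is also the visited test (`node not in order`).
def tourLoop (fuel : Nat) (adj_lst : List (Int × List Int))
    (stack order : List Int) : List Int :=
  match fuel, stack with
  | 0, _ => order
  | _ + 1, [] => order
  | f + 1, node :: rest =>
    if order.contains node then tourLoop f adj_lst rest order
    else tourLoop f adj_lst (pvLookup adj_lst node ++ rest) (order ++ [node])

-- B's `_tour` helper: order + [order[0]]
def tourB (adj_lst : List (Int × List Int)) (start : Int) : List Int :=
  let order := tourLoop (pvFuel adj_lst) adj_lst [start] []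
  order ++ [order.headD 0]

def find_veh_tsp_tours_alt (vehicles : List Int) (adj_lst : List (Int × List Int)) : List (List Int) :=
  vehicles.map (tourB adj_lst)

-- ===== PRECONDITION & SPEC =====

-- nodes reachable from the vehicles through keyed nodes: saturate the neighbour relation
-- (a node without an adjacency entry contributes no neighbours); adj_lst.length + 1 rounds
-- reach the fixpoint, since each strictly growing round adds a node with an adjacency entry.
def pvReach (vehicles : List Int) (adj_lst : List (Int × List Int)) : List Int :=
  (List.range (adj_lst.length + 1)).foldl
    (fun s _ => PySem.List.dedup (s ++ s.flatMap (pvLookup adj_lst)))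
    (PySem.List.dedup vehicles)

-- Python A (and B) raise KeyError exactly when some DFS reaches a node with no adjacency
-- entry, i.e. when some node reachable from a vehicle lacks an entry; Pre_ excludes those.
def Pre_find_veh_tsp_tours (vehicles : List Int) (adj_lst : List (Int × List Int)) : Prop :=
  ∀ n ∈ pvReach vehicles adj_lst, (List.lookup n adj_lst).isSome = true
instance (vehicles : List Int) (adj_lst : List (Int × List Int)) : Decidable (Pre_find_veh_tsp_tours vehicles adj_lst) := by unfold Pre_find_veh_tsp_tours; infer_instance

def pvWitness_find_veh_tsp_tours : List Int × (List (Int × List Int)) :=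
  ([1, 3], [(1, [2, 3]), (2, [1]), (3, [2])])

def Spec_find_veh_tsp_tours (vehicles : List Int) (adj_lst : List (Int × List Int)) (out : List (List Int)) : Prop := out = find_veh_tsp_tours_alt vehicles adj_lst
instance (vehicles : List Int) (adj_lst : List (Int × List Int)) (out : List (List Int)) : Decidable (Spec_find_veh_tsp_tours vehicles adj_lst out) := by unfold Spec_find_veh_tsp_tours; infer_instance

-- ===== CLAIM (what is proved, stated in full; the proofs are below) =====
def Claim_equal_find_veh_tsp_tours : Prop := ∀ (vehicles : List Int) (adj_lst : List (Int × List Int)), Dom_find_veh_tsp_tours vehicles adj_lst → Pre_find_veh_tsp_tours vehicles adj_lst → Spec_find_veh_tsp_tours vehicles adj_lst (find_veh_tsp_tours vehicles adj_lst)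

-- ===== LEMMAS AND PROOFS =====

-- leftover fuel never exceeds the fuel supplied
theorem dfsA_fuel_le (fuel : Nat) (adj_lst : List (Int × List Int)) :
    ∀ ns path visited, (dfsA fuel adj_lst ns path visited).2 ≤ fuel := by
  induction fuel using Nat.strong_induction_on with
  | _ f ih =>
    intro ns path visited
    match ns with
    | [] => simp [dfsA]
    | n :: rest =>
      match f with
      | 0 => simp [dfsA]
      | g + 1 =>
        rw [dfsA]
        split
        · exact le_trans (ih g (by omega) _ _ _) (by omega)
        · exact le_trans (ih _ (by omega) _ _ _) (by omega)

-- when A's DFS starts with visited equal to its path, they stay equal (a preorder path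
-- never repeats a node, so the path IS the visited set, in insertion order)
theorem dfsA_visited_eq_path (fuel : Nat) (adj_lst : List (Int × List Int)) :
    ∀ ns p, (dfsA fuel adj_lst ns p p).1.2 = (dfsA fuel adj_lst ns p p).1.1 := by
  induction fuel using Nat.strong_induction_on with
  | _ f ih =>
    intro ns p
    match ns with
    | [] => simp [dfsA]
    | n :: rest =>
      match f with
      | 0 => simp [dfsA]
      | g + 1 =>
        rw [dfsA]
        split
        · exact ih g (by omega) rest p
        · next hc =>
          have hnm : n ∉ p := by simpa [PySem.Set.contains] using hc
          have hadd : PySem.Set.add p n = p ++ [n] := by simp [PySem.Set.add, hnm]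
          rw [hadd]
          have h1 := ih g (by omega) (pvLookup adj_lst n) (p ++ [n])
          simp only [h1]
          exact ih _ (Nat.lt_succ_of_le (le_trans (Nat.min_le_right _ _) (le_refl g))) rest _

theorem tourLoop_nil (fuel : Nat) (adj_lst : List (Int × List Int)) (order : List Int) :
    tourLoop fuel adj_lst [] order = order := by
  cases fuel <;> rfl

-- B's stack machine run on `ns ++ stack` with order = visited-path p first performs
-- exactly A's recursive DFS on `ns`
theorem tourLoop_eq_dfsA (adj_lst : List (Int × List Int)) :
    ∀ fuel ns stack p,
      tourLoop fuel adj_lst (ns ++ stack) p =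
        tourLoop (dfsA fuel adj_lst ns p p).2 adj_lst stack (dfsA fuel adj_lst ns p p).1.1 := by
  intro fuel
  induction fuel using Nat.strong_induction_on with
  | _ f ih =>
    intro ns stack p
    match ns with
    | [] => simp [dfsA]
    | n :: rest =>
      match f with
      | 0 => simp only [dfsA, tourLoop]
      | g + 1 =>
        simp only [List.cons_append, dfsA, tourLoop]
        have hcond : PySem.Set.contains p n = p.contains n := rfl
        rw [← hcond]
        split
        · exact ih g (by omega) rest stack p
        · next hc =>
          have hnm : n ∉ p := by simpa [PySem.Set.contains] using hc
          have hadd : PySem.Set.add p n = p ++ [n] := by simp [PySem.Set.add, hnm]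
          rw [hadd]
          rw [ih g (by omega) (pvLookup adj_lst n) (rest ++ stack) (p ++ [n])]
          have hvp := dfsA_visited_eq_path g adj_lst (pvLookup adj_lst n) (p ++ [n])
          simp only [hvp]
          have hle := dfsA_fuel_le g adj_lst (pvLookup adj_lst n) (p ++ [n]) (p ++ [n])
          simp only [Nat.min_eq_left hle]
          exact ih _ (Nat.lt_succ_of_le hle) rest stack _

-- per vehicle, B's tour equals A's tour
theorem tour_eq (adj_lst : List (Int × List Int)) (v : Int) :
    tourB adj_lst v =
      (let t := (dfsA (pvFuel adj_lst) adj_lst [v] [] PySem.Set.empty).1.1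
       t ++ [t.headD 0]) := by
  have h := tourLoop_eq_dfsA adj_lst (pvFuel adj_lst) [v] [] []
  simp only [List.append_nil] at h
  simp only [tourB, h, tourLoop_nil]
  rfl

-- the ports are total, so they agree on every input (Pre_ only marks where Python returns)
theorem tours_eq (adj_lst : List (Int × List Int)) :
    ∀ vehicles, find_veh_tsp_tours vehicles adj_lst = find_veh_tsp_tours_alt vehicles adj_lst := by
  intro vehicles
  unfold find_veh_tsp_tours find_veh_tsp_tours_alt
  induction vehicles using List.reverseRecOn with
  | nil => rfl
  | append_singleton xs x ih =>
    simp only [List.foldl_append, List.foldl_cons, List.foldl_nil, List.map_append,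
      List.map_cons, List.map_nil, ih, tour_eq]

theorem find_veh_tsp_tours_spec : Claim_equal_find_veh_tsp_tours := by
  intro vehicles adj_lst _ _
  exact tours_eq adj_lst vehicles
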